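-- pv_equiv track=rewrite | github.com/corahama/python | hacker_rank/c3_interview_2.py | count_items_op
-- ===== SOURCE A (Python) =====
-- def count_items_op(arr):
--     head, tail = 0,0
--     max_items = 0
--
--     i_count = {}
--     while head < len(arr):
--         if len(list(filter(lambda v: v > 0, i_count.values()))) > 2:
--             i_count[arr[tail]] -= 1
--             tail += 1
--         else:
--             if arr[head] not in i_count:
--                 i_count[arr[head]] = 1
--             else:
--                 i_count[arr[head]] += 1
--             head += 1
--
--         temp_itms = list(filter(lambda v: v > 0, i_count.values()))
--         if len(temp_itms) <=  2:
--             if sum(temp_itms) > max_items: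
--                 max_items = sum(temp_itms)
--
--     return max_items
-- ===== SOURCE B (Python) =====
-- def count_items_op(arr):
--     ans = 0
--     cur = 0   # length of the longest valid window ending at the current element
--     run = 0   # length of the run of equal values ending at the current element
--     a = None  # the distinct value seen just before that run (None if none)
--     b = None  # the value of that run (the previous element)
--     for c in arr:
--         cur = cur + 1 if (c == a or c == b) else run + 1
--         run = run + 1 if c == b else 1
--         if c != b:
--             a, b = b, c
--         if cur > ans:
--             ans = cur
--     return ans
-- ===== Notes on version B (the rewrite author's own statement) =====
-- stated objective: faster
-- what changed: Replaced A's dict-of-counts window with per-step filter+sum scans (O(n*U)) by a dict-free O(1)-state single pass with no inner loop: it tracks only the best answer, the length of the current valid window, the length of the run of equal values ending here, and the last two distinct values, jumping the window start implicitly via the run length when a third value appears.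
import Mathlib
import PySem

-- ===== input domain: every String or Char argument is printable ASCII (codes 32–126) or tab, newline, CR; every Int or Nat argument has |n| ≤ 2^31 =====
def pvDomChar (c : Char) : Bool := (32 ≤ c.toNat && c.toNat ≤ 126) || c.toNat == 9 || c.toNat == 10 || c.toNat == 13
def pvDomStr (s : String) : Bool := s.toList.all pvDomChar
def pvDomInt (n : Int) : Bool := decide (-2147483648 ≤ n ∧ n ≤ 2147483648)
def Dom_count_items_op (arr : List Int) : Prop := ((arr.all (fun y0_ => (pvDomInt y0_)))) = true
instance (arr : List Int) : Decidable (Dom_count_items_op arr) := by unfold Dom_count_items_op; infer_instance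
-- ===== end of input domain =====

-- B replaces A's dict-of-counts window with its per-step filter+sum scan by a dict-free,
-- O(1)-state single pass with no inner loop (measured faster).

-- ===== PORT A =====
-- the trailing record step of A's loop body: temp_itms = positive counts; update max_items
def pvRecord (d : PySem.Dict Int Int) (mx : Int) : Int :=
  if (d.values.filter (fun v => decide (0 < v))).length ≤ 2 then
    (if (d.values.filter (fun v => decide (0 < v))).sum > mx
      then (d.values.filter (fun v => decide (0 < v))).sum else mx)
  else mx

-- A's while loop; fuel = 2*len+1 always suffices (every iteration advances head or tail, both
-- bounded by len on every reachable state), so fuel exhaustion is unreachable.  head/tail stay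
-- ≥ 0 in Python, so Nat indices with List.getD are exact here: the indices are in range and
-- arr[tail] is a present dict key on every reachable state (both proved inside the invariant).
def aLoop (arr : List Int) : Nat → Nat → Nat → Int → PySem.Dict Int Int → Int
  | 0, _, _, mx, _ => mx
  | fuel + 1, tail, head, mx, d =>
    if head < arr.length then
      if (d.values.filter (fun v => decide (0 < v))).length > 2 then
        let y := arr.getD tail 0
        let d1 := d.insert y (d.getD y 0 - 1)
        aLoop arr fuel (tail + 1) head (pvRecord d1 mx) d1
      else
        let x := arr.getD head 0
        let d1 := if d.contains x then d.insert x (d.getD x 0 + 1) else d.insert x 1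
        aLoop arr fuel tail (head + 1) (pvRecord d1 mx) d1
    else mx

def count_items_op (arr : List Int) : Int :=
  aLoop arr (2 * arr.length + 1) 0 0 0 PySem.Dict.empty

-- ===== PORT B =====
-- body of B's `for c in arr` loop; state = (ans, cur, run, a, b)
def nStep (s : Int × Int × Int × Option Int × Option Int) (c : Int) :
    Int × Int × Int × Option Int × Option Int :=
  let cur1 := if some c = s.2.2.2.1 ∨ some c = s.2.2.2.2 then s.2.1 + 1 else s.2.2.1 + 1
  let run1 := if some c = s.2.2.2.2 then s.2.2.1 + 1 else 1
  let ab1 := if some c ≠ s.2.2.2.2 then (s.2.2.2.2, some c) else (s.2.2.2.1, s.2.2.2.2)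
  let ans1 := if cur1 > s.1 then cur1 else s.1
  (ans1, cur1, run1, ab1)

def count_items_op_alt (arr : List Int) : Int :=
  (arr.foldl nStep (0, 0, 0, none, none)).1

-- ===== PRECONDITION & SPEC =====
def Spec_count_items_op (arr : List Int) (out : Int) : Prop := out = count_items_op_alt arr
instance (arr : List Int) (out : Int) : Decidable (Spec_count_items_op arr out) := by unfold Spec_count_items_op; infer_instance

-- ===== CLAIM (what is proved, stated in full; the proofs are below) =====
def Claim_equal_count_items_op : Prop := ∀ (arr : List Int), Dom_count_items_op arr → Spec_count_items_op arr (count_items_op arr)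

-- ===== LEMMAS AND PROOFS =====

-- reference sliding window (proof helper only): A is first proved equal to this standard
-- counting window, which is then proved equal to B's O(1)-state pass
def bShrink (arr : List Int) : Nat → Nat → Int → PySem.Dict Int Int → Nat × Int × PySem.Dict Int Int
  | 0, tail, distinct, d => (tail, distinct, d)
  | fuel + 1, tail, distinct, d =>
    if distinct > 2 then
      let y := arr.getD tail 0
      let d1 := d.insert y (d.getD y 0 - 1)
      let distinct1 := if d1.getD y 0 = 0 then distinct - 1 else distinct
      bShrink arr fuel (tail + 1) distinct1 d1
    else (tail, distinct, d)

def bStep (arr : List Int) (s : Nat × Int × Int × PySem.Dict Int Int) (head : Nat) :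
    Nat × Int × Int × PySem.Dict Int Int :=
  let x := arr.getD head 0
  let c := s.2.2.2.getD x 0
  let d1 := s.2.2.2.insert x (c + 1)
  let distinct1 := if c = 0 then s.2.1 + 1 else s.2.1
  let s2 := bShrink arr (head + 2) s.1 distinct1 d1
  let best1 := if (head : Int) - s2.1 + 1 > s.2.2.1 then (head : Int) - s2.1 + 1 else s.2.2.1
  (s2.1, s2.2.1, best1, s2.2.2)

def refSlide (arr : List Int) : Int :=
  ((List.range arr.length).foldl (bStep arr) (0, 0, 0, PySem.Dict.empty)).2.2.1

def pvWin (arr : List Int) (tail head : Nat) : List Int := (arr.drop tail).take (head - tail)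

def InvD (arr : List Int) (tail head : Nat) (d : PySem.Dict Int Int) : Prop :=
  tail ≤ head ∧ head ≤ arr.length ∧ d.keys.Nodup ∧
  ∀ k : Int, d.getD k 0 = ((pvWin arr tail head).count k : Int)

theorem sum_filter_pos (l : List Int) (h : ∀ v ∈ l, 0 ≤ v) :
    (l.filter (fun v => decide (0 < v))).sum = l.sum := by
  induction l with
  | nil => simp
  | cons a t ih =>
    have ha : 0 ≤ a := h a (by simp)
    have ht : ∀ v ∈ t, 0 ≤ v := fun v hv => h v (by simp [hv])
    by_cases hpos : 0 < a
    · simp [hpos, ih ht]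
    · have : a = 0 := by omega
      simp [ih ht, this]

theorem mem_keys_of_mem_win (arr : List Int) (tail head : Nat) (d : PySem.Dict Int Int)
    (hI : InvD arr tail head d) {x : Int} (hx : x ∈ pvWin arr tail head) : x ∈ d.keys := by
  obtain ⟨-, -, -, hc⟩ := hI
  by_contra hmem
  have hcon : d.contains x = false := by
    rcases Bool.eq_false_or_eq_true (d.contains x) with h | h
    · exact absurd ((PySem.Dict.contains_iff_mem_keys d x).mp h) hmem
    · exact h
  have h0 := PySem.Dict.getD_of_not_contains d 0 hcon
  rw [hc x] at h0
  have : 0 < (pvWin arr tail head).count x := List.count_pos_iff.mpr hx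
  omega

theorem filter_keys_eq (arr : List Int) (tail head : Nat) (d : PySem.Dict Int Int)
    (hI : InvD arr tail head d) :
    (d.keys.filter (fun k => decide (0 < d.getD k 0))).toFinset = (pvWin arr tail head).toFinset := by
  obtain ⟨h1, h2, hnd, hc⟩ := hI
  ext x
  simp only [List.mem_toFinset, List.mem_filter, decide_eq_true_eq]
  constructor
  · rintro ⟨-, hpos⟩
    rw [hc x] at hpos
    exact List.count_pos_iff.mp (by exact_mod_cast hpos)
  · intro hx
    refine ⟨mem_keys_of_mem_win arr tail head d ⟨h1, h2, hnd, hc⟩ hx, ?_⟩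
    rw [hc x]
    exact_mod_cast List.count_pos_iff.mpr hx

theorem posLen_eq (arr : List Int) (tail head : Nat) (d : PySem.Dict Int Int)
    (hI : InvD arr tail head d) :
    (d.values.filter (fun v => decide (0 < v))).length = (pvWin arr tail head).toFinset.card := by
  obtain ⟨h1, h2, hnd, hc⟩ := hI
  rw [PySem.Dict.values_eq_map_keys d hnd 0, List.filter_map, List.length_map]
  have hS : (d.keys.filter (fun k => decide (0 < d.getD k 0))).toFinset
      = (pvWin arr tail head).toFinset := filter_keys_eq arr tail head d ⟨h1, h2, hnd, hc⟩
  calc (d.keys.filter ((fun v => decide (0 < v)) ∘ fun k => d.getD k 0)).length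
      = (d.keys.filter (fun k => decide (0 < d.getD k 0))).toFinset.card := by
        rw [List.toFinset_card_of_nodup (hnd.filter _)]; rfl
    _ = _ := by rw [hS]

theorem posSum_eq (arr : List Int) (tail head : Nat) (d : PySem.Dict Int Int)
    (hI : InvD arr tail head d) :
    (d.values.filter (fun v => decide (0 < v))).sum = (head : Int) - tail := by
  obtain ⟨h1, h2, hnd, hc⟩ := hI
  rw [PySem.Dict.values_eq_map_keys d hnd 0]
  rw [sum_filter_pos _ (by
    intro v hv
    obtain ⟨k, -, rfl⟩ := List.mem_map.mp hv
    rw [hc k]; positivity)]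
  rw [← List.sum_toFinset _ hnd]
  have hsub : (pvWin arr tail head).toFinset ⊆ d.keys.toFinset := by
    intro x hx
    exact List.mem_toFinset.mpr (mem_keys_of_mem_win arr tail head d ⟨h1, h2, hnd, hc⟩
      (List.mem_toFinset.mp hx))
  rw [← Finset.sum_subset hsub (by
    intro x _ hxw
    rw [hc x]
    have : (pvWin arr tail head).count x = 0 := by
      rcases Nat.eq_zero_or_pos ((pvWin arr tail head).count x) with h | h
      · exact h
      · exact absurd (List.mem_toFinset.mpr (List.count_pos_iff.mp h)) hxw
    simp [this])]
  have : ∑ x ∈ (pvWin arr tail head).toFinset, d.getD x 0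
      = ((∑ x ∈ (pvWin arr tail head).toFinset, (pvWin arr tail head).count x : Nat) : Int) := by
    push_cast
    exact Finset.sum_congr rfl (fun x _ => hc x)
  rw [this, List.sum_toFinset_count_eq_length]
  have hlen : (pvWin arr tail head).length = head - tail := by
    simp [pvWin]; omega
  rw [hlen]
  omega

theorem win_cons (arr : List Int) (tail head : Nat) (h1 : tail < head) (h2 : head ≤ arr.length) :
    pvWin arr tail head = arr.getD tail 0 :: pvWin arr (tail + 1) head := by
  have hlt : tail < arr.length := by omega
  have hd : arr.drop tail = arr[tail] :: arr.drop (tail + 1) := List.drop_eq_getElem_cons hlt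
  have hm : head - tail = (head - (tail + 1)) + 1 := by omega
  rw [pvWin, pvWin, hd, hm, List.take_succ_cons, List.getD_eq_getElem arr 0 hlt]

theorem win_snoc (arr : List Int) (tail head : Nat) (h1 : tail ≤ head) (h2 : head < arr.length) :
    pvWin arr tail (head + 1) = pvWin arr tail head ++ [arr.getD head 0] := by
  have hm : head + 1 - tail = (head - tail) + 1 := by omega
  rw [pvWin, pvWin, hm, List.take_add_one]
  congr 1
  have : (arr.drop tail)[head - tail]? = arr[tail + (head - tail)]? := List.getElem?_drop
  rw [this]
  have he : tail + (head - tail) = head := by omega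
  rw [he, List.getElem?_eq_getElem h2, List.getD_eq_getElem arr 0 h2]
  rfl

theorem card_not_mem_zero (W : List Int) {x : Int} (hmem : x ∉ W) : W.count x = 0 := by
  rcases Nat.eq_zero_or_pos (W.count x) with h | h
  · exact h
  · exact absurd (List.count_pos_iff.mp h) hmem

theorem add_step (arr : List Int) (tail head : Nat) (d : PySem.Dict Int Int)
    (hI : InvD arr tail head d) (hlt : head < arr.length) :
    InvD arr tail (head + 1) (d.insert (arr.getD head 0) (d.getD (arr.getD head 0) 0 + 1)) ∧
    ((pvWin arr tail (head + 1)).toFinset.card : Int)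
      = ((pvWin arr tail head).toFinset.card : Int)
        + (if d.getD (arr.getD head 0) 0 = 0 then 1 else 0) := by
  obtain ⟨h1, h2, hnd, hc⟩ := hI
  have hw := win_snoc arr tail head h1 hlt
  generalize hxv : arr.getD head 0 = x at hw ⊢
  constructor
  · refine ⟨by omega, by omega, PySem.Dict.nodup_keys_insert d x _ hnd, ?_⟩
    intro k
    rw [PySem.Dict.getD_insert, hw, List.count_append]
    by_cases hk : k = x
    · rw [if_pos hk, hk, hc x]
      simp
    · rw [if_neg hk, hc k]
      have : List.count k [x] = 0 := by simp [Ne.symm hk]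
      rw [this]
      push_cast; ring
  · rw [hw, List.toFinset_append]
    have hins : (pvWin arr tail head).toFinset ∪ [x].toFinset
        = insert x (pvWin arr tail head).toFinset := by
      ext z; simp
    rw [hins]
    by_cases hmem : x ∈ pvWin arr tail head
    · have hpos : 0 < (pvWin arr tail head).count x := List.count_pos_iff.mpr hmem
      rw [if_neg (by rw [hc x]; omega), Finset.insert_eq_self.mpr (List.mem_toFinset.mpr hmem)]
      ring
    · rw [if_pos (by rw [hc x, card_not_mem_zero _ hmem]; rfl),
        Finset.card_insert_of_notMem (fun h => hmem (List.mem_toFinset.mp h))]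
      push_cast; ring

theorem shrink_step (arr : List Int) (tail head : Nat) (d : PySem.Dict Int Int)
    (hI : InvD arr tail head d) (hlt : tail < head) :
    InvD arr (tail + 1) head (d.insert (arr.getD tail 0) (d.getD (arr.getD tail 0) 0 - 1)) ∧
    1 ≤ d.getD (arr.getD tail 0) 0 ∧
    ((pvWin arr (tail + 1) head).toFinset.card : Int)
      = ((pvWin arr tail head).toFinset.card : Int)
        - (if d.getD (arr.getD tail 0) 0 - 1 = 0 then 1 else 0) := by
  obtain ⟨h1, h2, hnd, hc⟩ := hI
  have hw := win_cons arr tail head hlt h2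
  generalize hxv : arr.getD tail 0 = y at hw ⊢
  have hcy : d.getD y 0 = ((pvWin arr (tail + 1) head).count y : Int) + 1 := by
    rw [hc y, hw, List.count_cons_self]
    push_cast; ring
  refine ⟨⟨by omega, h2, PySem.Dict.nodup_keys_insert d y _ hnd, ?_⟩, by omega, ?_⟩
  · intro k
    rw [PySem.Dict.getD_insert]
    by_cases hk : k = y
    · rw [if_pos hk, hk, hcy]; ring
    · rw [if_neg hk, hc k, hw, List.count_cons_of_ne (Ne.symm hk)]
  · rw [hw, List.toFinset_cons]
    by_cases hmem : y ∈ pvWin arr (tail + 1) head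
    · have hpos : 0 < (pvWin arr (tail + 1) head).count y := List.count_pos_iff.mpr hmem
      rw [if_neg (by omega), Finset.insert_eq_self.mpr (List.mem_toFinset.mpr hmem)]
      ring
    · have hzero := card_not_mem_zero _ hmem
      rw [if_pos (by omega),
        Finset.card_insert_of_notMem (fun h => hmem (List.mem_toFinset.mp h))]
      push_cast; ring

theorem invd_init (arr : List Int) : InvD arr 0 0 PySem.Dict.empty := by
  refine ⟨le_refl _, Nat.zero_le _, ?_, ?_⟩ <;>
    simp [pvWin, PySem.Dict.keys_empty, PySem.Dict.getD_empty]

theorem record_eq (arr : List Int) (tail head : Nat) (d : PySem.Dict Int Int)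
    (hI : InvD arr tail head d) (mx : Int) :
    pvRecord d mx =
      if (pvWin arr tail head).toFinset.card ≤ 2 then
        (if (head : Int) - tail > mx then (head : Int) - tail else mx)
      else mx := by
  unfold pvRecord
  rw [posLen_eq arr tail head d hI, posSum_eq arr tail head d hI]

theorem win_nonempty (arr : List Int) (tail head : Nat) (h1 : tail ≤ head)
    (_h2 : head ≤ arr.length) (hc : 0 < (pvWin arr tail head).toFinset.card) : tail < head := by
  by_contra h
  have : pvWin arr tail head = [] := by
    unfold pvWin
    have : head - tail = 0 := by omega
    simp [this]
  simp [this] at hc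

theorem bShrink_done (arr : List Int) (fb tail : Nat) (distinct : Int) (d : PySem.Dict Int Int)
    (h : ¬ distinct > 2) : bShrink arr fb tail distinct d = (tail, distinct, d) := by
  cases fb <;> simp [bShrink, h]

theorem a_add_eq (d : PySem.Dict Int Int) (x : Int) :
    (if d.contains x then d.insert x (d.getD x 0 + 1) else d.insert x 1)
      = d.insert x (d.getD x 0 + 1) := by
  by_cases h : d.contains x
  · simp [h]
  · rw [if_neg h, PySem.Dict.getD_of_not_contains d 0 (by simpa using h)]
    norm_num

-- at head = len(arr) the pending record after the final shrink run never raises mx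
theorem shrink_end (arr : List Int) (mx : Int) : ∀ (fb tail : Nat) (distinct : Int)
    (d : PySem.Dict Int Int),
    InvD arr tail arr.length d →
    distinct = ((pvWin arr tail arr.length).toFinset.card : Int) →
    distinct ≤ 3 →
    (distinct = 3 → (arr.length : Int) - tail - 1 ≤ mx) →
    (distinct ≤ 2 → (arr.length : Int) - tail ≤ mx) →
    arr.length - tail ≤ fb →
    (if (arr.length : Int) - (bShrink arr fb tail distinct d).1 > mx
      then (arr.length : Int) - (bShrink arr fb tail distinct d).1 else mx) = mx := by
  intro fb
  induction fb with
  | zero =>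
    intro tail distinct d hI hdist h3 h43 h52 hfb
    obtain ⟨h1, h2, hnd, hc⟩ := hI
    have htn : tail = arr.length := by omega
    have hW : pvWin arr tail arr.length = [] := by
      unfold pvWin
      have : arr.length - tail = 0 := by omega
      simp [this]
    rw [hW] at hdist
    simp at hdist
    simp only [bShrink]
    rw [if_neg (by have := h52 (by omega); omega)]
  | succ fb ih =>
    intro tail distinct d hI hdist h3 h43 h52 hfb
    by_cases hgt : distinct > 2
    · have hcpos : 0 < (pvWin arr tail arr.length).toFinset.card := by omega
      have hlt : tail < arr.length := win_nonempty arr tail arr.length hI.1 hI.2.1 hcpos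
      obtain ⟨hI', hge1, hcard'⟩ := shrink_step arr tail arr.length d hI hlt
      simp only [bShrink, if_pos hgt]
      have hgd : (d.insert (arr.getD tail 0) (d.getD (arr.getD tail 0) 0 - 1)).getD
          (arr.getD tail 0) 0 = d.getD (arr.getD tail 0) 0 - 1 :=
        PySem.Dict.getD_insert_self d (arr.getD tail 0) _ 0
      rw [hgd]
      apply ih (tail + 1) _ _ hI'
      · rw [hcard', hdist]; split_ifs <;> ring
      · split_ifs <;> omega
      · intro h
        have hb := h43 (by omega)
        push_cast
        push_cast at hb
        omega
      · intro h
        have hb := h43 (by omega)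
        push_cast
        push_cast at hb
        omega
      · omega
    · rw [bShrink_done arr (fb + 1) tail distinct d hgt]
      exact if_neg (by have := h52 (by omega); omega)

-- main simulation: from any joint state (aligned or mid-shrink), the rest of A's while loop
-- computes the same answer as the rest of the reference sliding window's run
theorem simx (arr : List Int) : ∀ (fuel : Nat), ∀ (fb tail head : Nat) (mx distinct : Int)
    (d : PySem.Dict Int Int),
    InvD arr tail head d →
    distinct = ((pvWin arr tail head).toFinset.card : Int) →
    distinct ≤ 3 →
    (distinct = 3 → (head : Int) - tail - 1 ≤ mx) →
    (distinct ≤ 2 → (head : Int) - tail ≤ mx) →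
    (arr.length - head) + (arr.length - tail) < fuel →
    head - tail ≤ fb →
    aLoop arr fuel tail head mx d =
      (((List.range' head (arr.length - head)).foldl (bStep arr)
        ((bShrink arr fb tail distinct d).1,
         (bShrink arr fb tail distinct d).2.1,
         (if (head : Int) - (bShrink arr fb tail distinct d).1 > mx
           then (head : Int) - (bShrink arr fb tail distinct d).1 else mx),
         (bShrink arr fb tail distinct d).2.2)).2.2.1) := by
  intro fuel
  induction fuel using Nat.strong_induction_on with
  | _ fuel IH =>
  intro fb tail head mx distinct d hI hdist h3 h43 h52 hfuel hfb
  cases fuel with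
  | zero => omega
  | succ f =>
  have hpl := posLen_eq arr tail head d hI
  by_cases hA : distinct ≤ 2
  · -- aligned state: bShrink is the identity
    rw [bShrink_done arr fb tail distinct d (by omega)]
    simp only
    rw [if_neg (by have := h52 hA; omega)]
    by_cases hh : head < arr.length
    · -- A adds one element
      simp only [aLoop, if_pos hh, hpl]
      rw [if_neg (by omega), a_add_eq]
      obtain ⟨hI', hcard'⟩ := add_step arr tail head d hI hh
      have hrec := record_eq arr tail (head + 1) _ hI' mx
      have hrng : arr.length - head = (arr.length - (head + 1)) + 1 := by omega
      rw [hrng, List.range'_succ, List.foldl_cons]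
      simp only [bStep]
      set x := arr.getD head 0 with hx
      set d1 := d.insert x (d.getD x 0 + 1) with hd1
      set distinct1 := if d.getD x 0 = 0 then distinct + 1 else distinct with hdistinct1
      have hdist1 : distinct1 = ((pvWin arr tail (head + 1)).toFinset.card : Int) := by
        rw [hdistinct1, hcard', hdist]; split_ifs <;> ring
      have h3' : distinct1 ≤ 3 := by
        rw [hdist1, hcard']; rw [hdist] at hA; split_ifs <;> omega
      have hbb : (if (head : Int) - (bShrink arr (head + 2) tail distinct1 d1).1 + 1 > mx
            then (head : Int) - (bShrink arr (head + 2) tail distinct1 d1).1 + 1 else mx)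
          = (if ((head + 1 : Nat) : Int) - (bShrink arr (head + 2) tail distinct1 d1).1 > pvRecord d1 mx
            then ((head + 1 : Nat) : Int) - (bShrink arr (head + 2) tail distinct1 d1).1
            else pvRecord d1 mx) := by
        by_cases hC2 : ((pvWin arr tail (head + 1)).toFinset.card : Int) ≤ 2
        · rw [bShrink_done arr (head + 2) tail distinct1 d1 (by omega)]
          simp only
          rw [hrec, if_pos (show (pvWin arr tail (head + 1)).toFinset.card ≤ 2 from by omega)]
          push_cast
          split_ifs <;> omega
        · rw [hrec, if_neg (show ¬((pvWin arr tail (head + 1)).toFinset.card ≤ 2) from by omega)]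
          push_cast
          split_ifs <;> omega
      rw [hbb]
      exact IH f (by omega) (head + 2) tail (head + 1) (pvRecord d1 mx) distinct1 d1 hI' hdist1 h3'
        (by intro h
            rw [hrec, if_neg (show ¬((pvWin arr tail (head + 1)).toFinset.card ≤ 2) from by omega)]
            have hb := h52 hA
            push_cast
            omega)
        (by intro h
            rw [hrec, if_pos (show (pvWin arr tail (head + 1)).toFinset.card ≤ 2 from by omega)]
            push_cast
            split_ifs <;> omega)
        (by omega) (by omega)
    · -- head = len(arr): both sides are mx
      simp only [aLoop, if_neg hh]
      have : arr.length - head = 0 := by omega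
      rw [this]
      simp [List.range']
  · -- mid-shrink state: distinct = 3
    have hgt : distinct > 2 := by omega
    have hcpos : 0 < (pvWin arr tail head).toFinset.card := by omega
    have hlt : tail < head := win_nonempty arr tail head hI.1 hI.2.1 hcpos
    by_cases hh : head < arr.length
    · -- A shrinks once, and so does the reference's inner while loop
      obtain ⟨hI', hge1, hcard'⟩ := shrink_step arr tail head d hI hlt
      cases fb with
      | zero => omega
      | succ fb' =>
      simp only [bShrink, if_pos hgt]
      have hgd : (d.insert (arr.getD tail 0) (d.getD (arr.getD tail 0) 0 - 1)).getD
          (arr.getD tail 0) 0 = d.getD (arr.getD tail 0) 0 - 1 :=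
        PySem.Dict.getD_insert_self d (arr.getD tail 0) _ 0
      rw [hgd]
      set y := arr.getD tail 0 with hy
      set d1 := d.insert y (d.getD y 0 - 1) with hd1
      set distinct1 := if d.getD y 0 - 1 = 0 then distinct - 1 else distinct with hdistinct1
      have hdist1 : distinct1 = ((pvWin arr (tail + 1) head).toFinset.card : Int) := by
        rw [hdistinct1, hcard', hdist]; split_ifs <;> ring
      have h3' : distinct1 ≤ 3 := by
        rw [hdistinct1]; split_ifs <;> omega
      simp only [aLoop, if_pos hh, hpl]
      rw [if_pos (by omega)]
      have hrec := record_eq arr (tail + 1) head _ hI' mx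
      have hbb : (if (head : Int) - (bShrink arr fb' (tail + 1) distinct1 d1).1 > mx
            then (head : Int) - (bShrink arr fb' (tail + 1) distinct1 d1).1 else mx)
          = (if (head : Int) - (bShrink arr fb' (tail + 1) distinct1 d1).1 > pvRecord d1 mx
            then (head : Int) - (bShrink arr fb' (tail + 1) distinct1 d1).1
            else pvRecord d1 mx) := by
        by_cases hC2 : ((pvWin arr (tail + 1) head).toFinset.card : Int) ≤ 2
        · rw [bShrink_done arr fb' (tail + 1) distinct1 d1 (by omega)]
          simp only
          rw [hrec, if_pos (show (pvWin arr (tail + 1) head).toFinset.card ≤ 2 from by omega)]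
          push_cast
          split_ifs <;> omega
        · rw [hrec, if_neg (show ¬((pvWin arr (tail + 1) head).toFinset.card ≤ 2) from by omega)]
      rw [hbb]
      exact IH f (by omega) fb' (tail + 1) head (pvRecord d1 mx) distinct1 d1 hI' hdist1 h3'
        (by intro h
            rw [hrec, if_neg (show ¬((pvWin arr (tail + 1) head).toFinset.card ≤ 2) from by omega)]
            have hb := h43 (by omega)
            push_cast
            omega)
        (by intro h
            rw [hrec, if_pos (show (pvWin arr (tail + 1) head).toFinset.card ≤ 2 from by omega)]
            push_cast
            split_ifs <;> omega)
        (by omega) (by omega)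
    · -- head = len(arr): A stops; the reference's pending record cannot beat mx
      simp only [aLoop, if_neg hh]
      have hn : head = arr.length := by have := hI.2.1; omega
      subst hn
      rw [show arr.length - arr.length = 0 from by omega]
      simp only [List.range', List.foldl_nil]
      exact (shrink_end arr mx fb tail distinct d hI hdist h3 h43 h52 (by omega)).symm

theorem a_eq_ref (arr : List Int) : count_items_op arr = refSlide arr := by
  unfold count_items_op refSlide
  have h := simx arr (2 * arr.length + 1) 0 0 0 0 0 PySem.Dict.empty (invd_init arr)
    (by simp [pvWin]) (by simp) (by simp) (by simp) (by omega) (by omega)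
  rw [h, bShrink_done arr 0 0 0 PySem.Dict.empty (by norm_num)]
  simp [List.range_eq_range']

-- ===== second half: the reference sliding window equals B's O(1)-state pass =====

theorem getD_mem_win (arr : List Int) (tail head j : Nat) (h1 : tail ≤ j) (h2 : j < head)
    (h3 : head ≤ arr.length) : arr.getD j 0 ∈ pvWin arr tail head := by
  have hj : j < arr.length := lt_of_lt_of_le h2 h3
  have hk : j - tail < (pvWin arr tail head).length := by
    simp [pvWin]; omega
  have hv : (pvWin arr tail head)[j - tail]'hk = arr.getD j 0 := by
    simp only [pvWin, List.getElem_take, List.getElem_drop, List.getD_eq_getElem arr 0 hj]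
    congr 1
    omega
  rw [← hv]
  exact List.getElem_mem hk

theorem win_elem_eq (arr : List Int) (tail head : Nat) :
    ∀ z ∈ pvWin arr tail head, ∃ j, tail ≤ j ∧ j < head ∧ z = arr.getD j 0 := by
  intro z hz
  rw [List.mem_iff_getElem] at hz
  obtain ⟨k, hk, hke⟩ := hz
  have hklen : k < head - tail ∧ tail + k < arr.length := by
    constructor <;> [skip; skip] <;>
      · have := hk
        simp [pvWin] at this
        omega
  refine ⟨tail + k, by omega, by omega, ?_⟩
  rw [← hke]
  simp only [pvWin, List.getElem_take, List.getElem_drop,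
    List.getD_eq_getElem arr 0 hklen.2]

theorem card_win_mono (arr : List Int) (t head : Nat) (h1 : t ≤ head) (h2 : head < arr.length) :
    (pvWin arr t head).toFinset.card ≤ (pvWin arr t (head + 1)).toFinset.card := by
  rw [win_snoc arr t head h1 h2, List.toFinset_append]
  exact Finset.card_le_card Finset.subset_union_left

-- the simulation invariant tying the reference window state to B's O(1) state
def RelBN (arr : List Int) (head tail : Nat) (distinct best : Int) (d : PySem.Dict Int Int)
    (ans cur run : Int) (a b : Option Int) : Prop :=
  InvD arr tail head d ∧
  distinct = ((pvWin arr tail head).toFinset.card : Int) ∧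
  distinct ≤ 2 ∧
  best = ans ∧
  cur = (head : Int) - tail ∧
  (tail = 0 ∨ 3 ≤ (pvWin arr (tail - 1) head).toFinset.card) ∧
  (if head = 0 then tail = 0 ∧ run = 0 ∧ a = none ∧ b = none
   else ∃ rn : Nat, run = (rn : Int) ∧ 1 ≤ rn ∧ rn ≤ head ∧ tail ≤ head - rn ∧
     b = some (arr.getD (head - 1) 0) ∧
     (∀ j, head - rn ≤ j → j < head → arr.getD j 0 = arr.getD (head - 1) 0) ∧
     (head - rn = 0 ∨ arr.getD (head - rn - 1) 0 ≠ arr.getD (head - 1) 0) ∧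
     (tail < head - rn → a = some (arr.getD (head - rn - 1) 0)))

-- a full run of the reference's shrink loop lands exactly at the first index `goal`
-- whose window has at most two distinct values
theorem shrink_run (arr : List Int) (hd goal : Nat) : ∀ (fuel t : Nat) (d : PySem.Dict Int Int),
    t ≤ goal → InvD arr t hd d →
    (∀ u, t ≤ u → u < goal → 3 ≤ (pvWin arr u hd).toFinset.card) →
    (pvWin arr goal hd).toFinset.card ≤ 2 →
    goal - t < fuel →
    (bShrink arr fuel t ((pvWin arr t hd).toFinset.card : Int) d).1 = goal ∧
    (bShrink arr fuel t ((pvWin arr t hd).toFinset.card : Int) d).2.1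
      = ((pvWin arr goal hd).toFinset.card : Int) ∧
    InvD arr goal hd (bShrink arr fuel t ((pvWin arr t hd).toFinset.card : Int) d).2.2 := by
  intro fuel
  induction fuel with
  | zero => intro t d ht hI hbig hgoal hf; omega
  | succ fuel ih =>
    intro t d ht hI hbig hgoal hf
    by_cases hte : t = goal
    · subst hte
      rw [bShrink_done arr (fuel + 1) t _ d (by exact_mod_cast not_lt.mpr (by exact_mod_cast hgoal))]
      exact ⟨rfl, rfl, hI⟩
    · have htlt : t < goal := by omega
      have h3 : 3 ≤ (pvWin arr t hd).toFinset.card := hbig t le_rfl htlt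
      have hth : t < hd := win_nonempty arr t hd hI.1 hI.2.1 (by omega)
      obtain ⟨hI', hge1, hcard'⟩ := shrink_step arr t hd d hI hth
      simp only [bShrink, if_pos (show ((pvWin arr t hd).toFinset.card : Int) > 2 from by
        exact_mod_cast h3)]
      have hgd : (d.insert (arr.getD t 0) (d.getD (arr.getD t 0) 0 - 1)).getD
          (arr.getD t 0) 0 = d.getD (arr.getD t 0) 0 - 1 :=
        PySem.Dict.getD_insert_self d (arr.getD t 0) _ 0
      rw [hgd]
      have hdeq : (if d.getD (arr.getD t 0) 0 - 1 = 0
            then ((pvWin arr t hd).toFinset.card : Int) - 1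
            else ((pvWin arr t hd).toFinset.card : Int))
          = ((pvWin arr (t + 1) hd).toFinset.card : Int) := by
        rw [hcard']; split_ifs <;> ring
      rw [hdeq]
      exact ih (t + 1) _ (by omega) hI' (fun u hu1 hu2 => hbig u (by omega) hu2) hgoal (by omega)

theorem bStep_noshrink (arr : List Int) (tail head : Nat) (distinct best : Int)
    (d : PySem.Dict Int Int)
    (hle : (if d.getD (arr.getD head 0) 0 = 0 then distinct + 1 else distinct) ≤ 2) :
    bStep arr (tail, distinct, best, d) head
      = (tail, (if d.getD (arr.getD head 0) 0 = 0 then distinct + 1 else distinct),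
         (if (head : Int) - (tail : Int) + 1 > best then (head : Int) - (tail : Int) + 1 else best),
         d.insert (arr.getD head 0) (d.getD (arr.getD head 0) 0 + 1)) := by
  simp only [bStep]
  rw [bShrink_done arr (head + 2) tail _ _ (by omega)]

-- run bookkeeping after B restarts its run at a fresh element
theorem run_restart (arr : List Int) (head tail' : Nat) (run' : Int) (a' b' : Option Int)
    (hr : run' = 1) (ht : tail' ≤ head)
    (hb : b' = some (arr.getD head 0)) (hcx : arr.getD head 0 ≠ arr.getD (head - 1) 0)
    (ha : tail' < head → a' = some (arr.getD (head - 1) 0)) :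
    ∃ rn : Nat, run' = (rn : Int) ∧ 1 ≤ rn ∧ rn ≤ head + 1 ∧ tail' ≤ head + 1 - rn ∧
      b' = some (arr.getD (head + 1 - 1) 0) ∧
      (∀ j, head + 1 - rn ≤ j → j < head + 1 → arr.getD j 0 = arr.getD (head + 1 - 1) 0) ∧
      (head + 1 - rn = 0 ∨ arr.getD (head + 1 - rn - 1) 0 ≠ arr.getD (head + 1 - 1) 0) ∧
      (tail' < head + 1 - rn → a' = some (arr.getD (head + 1 - rn - 1) 0)) := by
  simp only [Nat.add_sub_cancel]
  refine ⟨1, by simpa using hr, le_rfl, by omega, by omega, hb, ?_, ?_, ?_⟩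
  · intro j hj1 hj2
    have : j = head := by omega
    rw [this]
  · exact Or.inr (fun h => hcx h.symm)
  · intro h
    exact ha (by omega)

-- run bookkeeping after B extends its current run
theorem run_extend (arr : List Int) (head rn : Nat) (tail' : Nat) (run' : Int) (a' b' : Option Int)
    (hrn : run' = (rn : Int) + 1) (hrn1 : 1 ≤ rn) (hrnh : rn ≤ head) (htl : tail' ≤ head - rn)
    (hb : b' = some (arr.getD (head - 1) 0)) (hcx : arr.getD head 0 = arr.getD (head - 1) 0)
    (hrunj : ∀ j, head - rn ≤ j → j < head → arr.getD j 0 = arr.getD (head - 1) 0)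
    (hbd : head - rn = 0 ∨ arr.getD (head - rn - 1) 0 ≠ arr.getD (head - 1) 0)
    (hacond : tail' < head - rn → a' = some (arr.getD (head - rn - 1) 0)) :
    ∃ rn' : Nat, run' = (rn' : Int) ∧ 1 ≤ rn' ∧ rn' ≤ head + 1 ∧ tail' ≤ head + 1 - rn' ∧
      b' = some (arr.getD (head + 1 - 1) 0) ∧
      (∀ j, head + 1 - rn' ≤ j → j < head + 1 → arr.getD j 0 = arr.getD (head + 1 - 1) 0) ∧
      (head + 1 - rn' = 0 ∨ arr.getD (head + 1 - rn' - 1) 0 ≠ arr.getD (head + 1 - 1) 0) ∧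
      (tail' < head + 1 - rn' → a' = some (arr.getD (head + 1 - rn' - 1) 0)) := by
  have e1 : head + 1 - (rn + 1) = head - rn := by omega
  simp only [Nat.add_sub_cancel]
  refine ⟨rn + 1, by rw [hrn]; push_cast; ring, by omega, by omega, by omega, ?_, ?_, ?_, ?_⟩
  · rw [hb]
    exact congrArg some hcx.symm
  · intro j hj1 hj2
    rw [e1] at hj1
    by_cases hjh : j = head
    · rw [hjh, hcx]
    · exact (hrunj j hj1 (by omega)).trans hcx.symm
  · rw [e1]
    rcases hbd with h | h
    · exact Or.inl h
    · exact Or.inr (fun heq => h (heq.trans hcx))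
  · intro hlt
    rw [e1] at hlt
    rw [e1]
    exact hacond hlt

-- one parallel step of the reference window and of B's pass preserves the invariant
theorem rel_step (arr : List Int) (head tail : Nat) (distinct best : Int)
    (d : PySem.Dict Int Int) (ans cur run : Int) (a b : Option Int)
    (hR : RelBN arr head tail distinct best d ans cur run a b) (hh : head < arr.length) :
    RelBN arr (head + 1)
      (bStep arr (tail, distinct, best, d) head).1
      (bStep arr (tail, distinct, best, d) head).2.1
      (bStep arr (tail, distinct, best, d) head).2.2.1
      (bStep arr (tail, distinct, best, d) head).2.2.2
      (nStep (ans, cur, run, a, b) (arr.getD head 0)).1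
      (nStep (ans, cur, run, a, b) (arr.getD head 0)).2.1
      (nStep (ans, cur, run, a, b) (arr.getD head 0)).2.2.1
      (nStep (ans, cur, run, a, b) (arr.getD head 0)).2.2.2.1
      (nStep (ans, cur, run, a, b) (arr.getD head 0)).2.2.2.2 := by
  obtain ⟨hI, hdist, h2d, hba, hcur, hmin, hrun⟩ := hR
  have hlen : head ≤ arr.length := hI.2.1
  have htle : tail ≤ head := hI.1
  have hc : ∀ k : Int, d.getD k 0 = ((pvWin arr tail head).count k : Int) := hI.2.2.2
  by_cases h0 : head = 0
  · -- first element: both states are still (almost) initial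
    subst h0
    rw [if_pos rfl] at hrun
    obtain ⟨ht0, hr0, ha0, hb0⟩ := hrun
    subst ht0; subst hr0; subst ha0; subst hb0
    have hwin0 : pvWin arr 0 0 = [] := by simp [pvWin]
    have hcnt : d.getD (arr.getD 0 0) 0 = 0 := by rw [hc, hwin0]; rfl
    have hdist0 : distinct = 0 := by rw [hdist, hwin0]; rfl
    obtain ⟨hI', hcard'⟩ := add_step arr 0 0 d hI hh
    have hstep_old := bStep_noshrink arr 0 0 distinct best d (by rw [if_pos hcnt]; omega)
    rw [if_pos hcnt] at hstep_old
    have hstep_new : nStep (ans, cur, (0 : Int), (none : Option Int), (none : Option Int))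
          (arr.getD 0 0)
        = ((if (0 : Int) + 1 > ans then (0 : Int) + 1 else ans), (0 : Int) + 1, (1 : Int),
           none, some (arr.getD 0 0)) := by
      simp only [nStep]
      rw [if_neg (show ¬(some (arr.getD 0 0) = (none : Option Int)
            ∨ some (arr.getD 0 0) = (none : Option Int)) by simp),
          if_neg (show ¬ some (arr.getD 0 0) = (none : Option Int) by simp),
          if_pos (show some (arr.getD 0 0) ≠ (none : Option Int) by simp)]
    simp only [hstep_old, hstep_new]
    refine ⟨hI', ?_, by omega, ?_, ?_, Or.inl rfl, ?_⟩
    · show distinct + 1 = _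
      rw [hcard', if_pos hcnt, ← hdist]
    · show (if ((0 : Nat) : Int) - ((0 : Nat) : Int) + 1 > best
          then ((0 : Nat) : Int) - ((0 : Nat) : Int) + 1 else best)
        = (if (0 : Int) + 1 > ans then (0 : Int) + 1 else ans)
      rw [hba]
      norm_num
    · show (0 : Int) + 1 = (((0 : Nat) + 1 : Nat) : Int) - ((0 : Nat) : Int)
      norm_num
    · rw [if_neg (Nat.succ_ne_zero 0)]
      refine ⟨1, by norm_num, le_rfl, le_rfl, by omega, rfl, ?_, Or.inl rfl, ?_⟩
      · intro j hj1 hj2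
        have : j = 0 := by omega
        rw [this]
      · intro h
        exact absurd h (by omega)
  · rw [if_neg h0] at hrun
    obtain ⟨rn, hrn, hrn1, hrnh, htl, hbx, hrunj, hbd, hacond⟩ := hrun
    have hxmem : arr.getD (head - 1) 0 ∈ pvWin arr tail head :=
      getD_mem_win arr tail head (head - 1) (by omega) (by omega) hlen
    have hcardle : (pvWin arr tail head).toFinset.card ≤ 2 := by
      have : ((pvWin arr tail head).toFinset.card : Int) ≤ 2 := hdist ▸ h2d
      exact_mod_cast this
    by_cases hcx : arr.getD head 0 = arr.getD (head - 1) 0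
    · -- N1: the new element continues the current run
      have hsb : some (arr.getD head 0) = b := by rw [hbx]; exact congrArg some hcx
      have hcmem : arr.getD head 0 ∈ pvWin arr tail head := by rw [hcx]; exact hxmem
      have hcnt : ¬ d.getD (arr.getD head 0) 0 = 0 := by
        rw [hc]
        have := List.count_pos_iff.mpr hcmem
        omega
      obtain ⟨hI', hcard'⟩ := add_step arr tail head d hI hh
      have hstep_old := bStep_noshrink arr tail head distinct best d (by rw [if_neg hcnt]; omega)
      rw [if_neg hcnt] at hstep_old
      have hstep_new : nStep (ans, cur, run, a, b) (arr.getD head 0)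
          = ((if cur + 1 > ans then cur + 1 else ans), cur + 1, run + 1, a, b) := by
        simp only [nStep]
        rw [if_pos (show some (arr.getD head 0) = a ∨ some (arr.getD head 0) = b from Or.inr hsb),
            if_pos hsb, if_neg (not_not_intro hsb)]
      simp only [hstep_old, hstep_new]
      refine ⟨hI', ?_, h2d, ?_, ?_, ?_, ?_⟩
      · show distinct = _
        rw [hcard', if_neg hcnt, ← hdist]
        ring
      · show (if (head : Int) - (tail : Int) + 1 > best then (head : Int) - (tail : Int) + 1 else best)
          = (if cur + 1 > ans then cur + 1 else ans)
        rw [hba, hcur]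
      · show cur + 1 = ((head + 1 : Nat) : Int) - (tail : Int)
        rw [hcur]
        push_cast
        ring
      · rcases hmin with h | h
        · exact Or.inl h
        · exact Or.inr (le_trans h (card_win_mono arr (tail - 1) head (by omega) hh))
      · rw [if_neg (Nat.succ_ne_zero head)]
        exact run_extend arr head rn tail (run + 1) a b (by rw [hrn]) hrn1 hrnh htl hbx hcx
          hrunj hbd hacond
    · have hsbne : some (arr.getD head 0) ≠ b := by
        rw [hbx]; simpa using hcx
      rcases lt_or_eq_of_le htl with htg | hteq
      · -- the window holds two values a, x
        have haval := hacond htg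
        have hamem : arr.getD (head - rn - 1) 0 ∈ pvWin arr tail head :=
          getD_mem_win arr tail head (head - rn - 1) (by omega) (by omega) hlen
        have hax : arr.getD (head - rn - 1) 0 ≠ arr.getD (head - 1) 0 := by
          rcases hbd with h | h
          · exact absurd h (by omega)
          · exact h
        by_cases hca : some (arr.getD head 0) = a
        · -- N2a: the new element equals the older window value a
          have hcaval : arr.getD head 0 = arr.getD (head - rn - 1) 0 :=
            Option.some.inj (hca.trans haval)
          have hcmem : arr.getD head 0 ∈ pvWin arr tail head := by rw [hcaval]; exact hamem
          have hcnt : ¬ d.getD (arr.getD head 0) 0 = 0 := by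
            rw [hc]
            have := List.count_pos_iff.mpr hcmem
            omega
          obtain ⟨hI', hcard'⟩ := add_step arr tail head d hI hh
          have hstep_old := bStep_noshrink arr tail head distinct best d
            (by rw [if_neg hcnt]; omega)
          rw [if_neg hcnt] at hstep_old
          have hstep_new : nStep (ans, cur, run, a, b) (arr.getD head 0)
              = ((if cur + 1 > ans then cur + 1 else ans), cur + 1, 1, b, some (arr.getD head 0)) := by
            simp only [nStep]
            rw [if_pos (show some (arr.getD head 0) = a ∨ some (arr.getD head 0) = b from Or.inl hca),
                if_neg (show ¬ some (arr.getD head 0) = b from hsbne), if_pos hsbne]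
          simp only [hstep_old, hstep_new]
          refine ⟨hI', ?_, h2d, ?_, ?_, ?_, ?_⟩
          · show distinct = _
            rw [hcard', if_neg hcnt, ← hdist]
            ring
          · show (if (head : Int) - (tail : Int) + 1 > best then (head : Int) - (tail : Int) + 1 else best)
              = (if cur + 1 > ans then cur + 1 else ans)
            rw [hba, hcur]
          · show cur + 1 = ((head + 1 : Nat) : Int) - (tail : Int)
            rw [hcur]
            push_cast
            ring
          · rcases hmin with h | h
            · exact Or.inl h
            · exact Or.inr (le_trans h (card_win_mono arr (tail - 1) head (by omega) hh))
          · rw [if_neg (Nat.succ_ne_zero head)]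
            exact run_restart arr head tail 1 b (some (arr.getD head 0)) rfl (by omega) rfl hcx
              (fun _ => hbx)
        · -- N3a: a third value arrives; the window start jumps to the run start
          have hS2 : (pvWin arr tail head).toFinset
              = {arr.getD (head - rn - 1) 0, arr.getD (head - 1) 0} := by
            have hsub : ({arr.getD (head - rn - 1) 0, arr.getD (head - 1) 0} : Finset Int)
                ⊆ (pvWin arr tail head).toFinset := by
              intro z hz
              simp only [Finset.mem_insert, Finset.mem_singleton] at hz
              rcases hz with rfl | rfl
              · exact List.mem_toFinset.mpr hamem
              · exact List.mem_toFinset.mpr hxmem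
            have hcard2 : ({arr.getD (head - rn - 1) 0, arr.getD (head - 1) 0}
                : Finset Int).card = 2 := by
              rw [Finset.card_insert_of_notMem (by simpa using hax), Finset.card_singleton]
            exact (Finset.eq_of_subset_of_card_le hsub (by rw [hcard2]; exact hcardle)).symm
          have hcnea : arr.getD head 0 ≠ arr.getD (head - rn - 1) 0 :=
            fun h => hca (by rw [haval]; exact congrArg some h)
          have hcnot : arr.getD head 0 ∉ pvWin arr tail head := by
            intro hm
            have hz := List.mem_toFinset.mpr hm
            rw [hS2] at hz
            simp only [Finset.mem_insert, Finset.mem_singleton] at hz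
            rcases hz with h | h
            · exact hcnea h
            · exact hcx h
          have hcnt : d.getD (arr.getD head 0) 0 = 0 := by
            rw [hc, card_not_mem_zero _ hcnot]; rfl
          have hd2 : distinct = 2 := by
            rw [hdist, hS2, Finset.card_insert_of_notMem (by simpa using hax),
              Finset.card_singleton]
            rfl
          obtain ⟨hI', hcard'⟩ := add_step arr tail head d hI hh
          have hbig : ∀ u, tail ≤ u → u < head - rn →
              3 ≤ (pvWin arr u (head + 1)).toFinset.card := by
            intro u hu1 hu2
            have hm1 : arr.getD (head - rn - 1) 0 ∈ pvWin arr u (head + 1) :=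
              getD_mem_win arr u (head + 1) (head - rn - 1) (by omega) (by omega) (by omega)
            have hm2 : arr.getD (head - 1) 0 ∈ pvWin arr u (head + 1) :=
              getD_mem_win arr u (head + 1) (head - 1) (by omega) (by omega) (by omega)
            have hm3 : arr.getD head 0 ∈ pvWin arr u (head + 1) :=
              getD_mem_win arr u (head + 1) head (by omega) (by omega) (by omega)
            have hsub : ({arr.getD (head - rn - 1) 0, arr.getD (head - 1) 0, arr.getD head 0}
                : Finset Int) ⊆ (pvWin arr u (head + 1)).toFinset := by
              intro z hz
              simp only [Finset.mem_insert, Finset.mem_singleton] at hz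
              rcases hz with rfl | rfl | rfl
              · exact List.mem_toFinset.mpr hm1
              · exact List.mem_toFinset.mpr hm2
              · exact List.mem_toFinset.mpr hm3
            have hc3 : ({arr.getD (head - rn - 1) 0, arr.getD (head - 1) 0, arr.getD head 0}
                : Finset Int).card = 3 := by
              rw [Finset.card_insert_of_notMem (by
                  simp only [Finset.mem_insert, Finset.mem_singleton, not_or]
                  exact ⟨hax, fun h => hcnea h.symm⟩),
                Finset.card_insert_of_notMem (by
                  simp only [Finset.mem_singleton]
                  exact fun h => hcx h.symm),
                Finset.card_singleton]
            calc 3 = ({arr.getD (head - rn - 1) 0, arr.getD (head - 1) 0, arr.getD head 0}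
                : Finset Int).card := hc3.symm
              _ ≤ _ := Finset.card_le_card hsub
          have hgle : (pvWin arr (head - rn) (head + 1)).toFinset.card ≤ 2 := by
            rw [win_snoc arr (head - rn) head (by omega) hh, List.toFinset_append]
            refine le_trans (Finset.card_le_card (show _ ⊆
              ({arr.getD (head - 1) 0, arr.getD head 0} : Finset Int) from ?_))
              (le_trans (Finset.card_insert_le _ _) (by simp))
            intro z hz
            simp only [Finset.mem_union, List.mem_toFinset, List.mem_singleton,
              Finset.mem_insert, Finset.mem_singleton] at hz ⊢
            rcases hz with hz | hz
            · obtain ⟨j, hj1, hj2, rfl⟩ := win_elem_eq arr (head - rn) head z hz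
              exact Or.inl (hrunj j hj1 hj2)
            · simp at hz
              exact Or.inr hz
          have hd1eq : (if d.getD (arr.getD head 0) 0 = 0 then distinct + 1 else distinct)
              = ((pvWin arr tail (head + 1)).toFinset.card : Int) := by
            rw [if_pos hcnt, hcard', if_pos hcnt, ← hdist]
          have hsr := shrink_run arr (head + 1) (head - rn) (head + 2) tail
            (d.insert (arr.getD head 0) (d.getD (arr.getD head 0) 0 + 1))
            (by omega) hI' hbig hgle (by omega)
          have hstep_old : bStep arr (tail, distinct, best, d) head
              = ((head - rn : Nat),
                 ((pvWin arr (head - rn) (head + 1)).toFinset.card : Int),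
                 (if (head : Int) - ((head - rn : Nat) : Int) + 1 > best
                   then (head : Int) - ((head - rn : Nat) : Int) + 1 else best),
                 (bShrink arr (head + 2) tail
                   ((pvWin arr tail (head + 1)).toFinset.card : Int)
                   (d.insert (arr.getD head 0) (d.getD (arr.getD head 0) 0 + 1))).2.2) := by
            simp only [bStep]
            rw [hd1eq, hsr.1, hsr.2.1]
          have hstep_new : nStep (ans, cur, run, a, b) (arr.getD head 0)
              = ((if run + 1 > ans then run + 1 else ans), run + 1, 1, b, some (arr.getD head 0)) := by
            simp only [nStep]
            rw [if_neg (show ¬(some (arr.getD head 0) = a ∨ some (arr.getD head 0) = b) from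
                  fun h => h.elim hca hsbne),
                if_neg (show ¬ some (arr.getD head 0) = b from hsbne), if_pos hsbne]
          simp only [hstep_old, hstep_new]
          have harith : (head : Int) - ((head - rn : Nat) : Int) + 1 = run + 1 := by
            rw [hrn]; omega
          refine ⟨hsr.2.2, rfl, by exact_mod_cast hgle, ?_, ?_, ?_, ?_⟩
          · show (if (head : Int) - ((head - rn : Nat) : Int) + 1 > best
                then (head : Int) - ((head - rn : Nat) : Int) + 1 else best)
              = (if run + 1 > ans then run + 1 else ans)
            rw [harith, hba]
          · show run + 1 = ((head + 1 : Nat) : Int) - ((head - rn : Nat) : Int)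
            rw [hrn]; omega
          · by_cases hg0 : head - rn = 0
            · exact Or.inl hg0
            · exact Or.inr (hbig (head - rn - 1) (by omega) (by omega))
          · rw [if_neg (Nat.succ_ne_zero head)]
            exact run_restart arr head (head - rn) 1 b (some (arr.getD head 0)) rfl (by omega)
              rfl hcx (fun _ => hbx)
      · -- the window is a pure run of x
        have hpure : ∀ z ∈ pvWin arr tail head, z = arr.getD (head - 1) 0 := by
          intro z hz
          obtain ⟨j, hj1, hj2, rfl⟩ := win_elem_eq arr tail head z hz
          exact hrunj j (by omega) hj2
        have hSx : (pvWin arr tail head).toFinset = {arr.getD (head - 1) 0} := by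
          ext z
          simp only [List.mem_toFinset, Finset.mem_singleton]
          exact ⟨fun hz => hpure z hz, fun hz => hz ▸ hxmem⟩
        have ht0 : tail = 0 := by
          by_cases htz : tail = 0
          · exact htz
          · exfalso
            rcases hmin with h | hmr
            · exact htz h
            · have hwc := win_cons arr (tail - 1) head (by omega) hlen
              have he : tail - 1 + 1 = tail := by omega
              rw [he] at hwc
              rw [hwc, List.toFinset_cons, hSx] at hmr
              have hle := Finset.card_insert_le (arr.getD (tail - 1) 0)
                ({arr.getD (head - 1) 0} : Finset Int)
              rw [Finset.card_singleton] at hle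
              omega
        subst ht0
        have hcnot : arr.getD head 0 ∉ pvWin arr 0 head := fun hm => hcx (hpure _ hm)
        have hcnt : d.getD (arr.getD head 0) 0 = 0 := by
          rw [hc, card_not_mem_zero _ hcnot]; rfl
        have hd1v : distinct = 1 := by rw [hdist, hSx]; rfl
        obtain ⟨hI', hcard'⟩ := add_step arr 0 head d hI hh
        have hstep_old := bStep_noshrink arr 0 head distinct best d (by rw [if_pos hcnt]; omega)
        rw [if_pos hcnt] at hstep_old
        by_cases hca : some (arr.getD head 0) = a
        · -- N2b: the stale previous value returns after a full-prefix run
          have hstep_new : nStep (ans, cur, run, a, b) (arr.getD head 0)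
              = ((if cur + 1 > ans then cur + 1 else ans), cur + 1, 1, b, some (arr.getD head 0)) := by
            simp only [nStep]
            rw [if_pos (show some (arr.getD head 0) = a ∨ some (arr.getD head 0) = b from Or.inl hca),
                if_neg (show ¬ some (arr.getD head 0) = b from hsbne), if_pos hsbne]
          simp only [hstep_old, hstep_new]
          refine ⟨hI', ?_, by omega, ?_, ?_, Or.inl rfl, ?_⟩
          · show distinct + 1 = _
            rw [hcard', if_pos hcnt, ← hdist]
          · show (if (head : Int) - ((0 : Nat) : Int) + 1 > best
                then (head : Int) - ((0 : Nat) : Int) + 1 else best)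
              = (if cur + 1 > ans then cur + 1 else ans)
            rw [hba, hcur]
          · show cur + 1 = ((head + 1 : Nat) : Int) - ((0 : Nat) : Int)
            rw [hcur]
            push_cast
            ring
          · rw [if_neg (Nat.succ_ne_zero head)]
            exact run_restart arr head 0 1 b (some (arr.getD head 0)) rfl (by omega) rfl hcx
              (fun _ => hbx)
        · -- N3b: a genuinely new value after a full-prefix run
          have hhr : rn = head := by omega
          have hstep_new : nStep (ans, cur, run, a, b) (arr.getD head 0)
              = ((if run + 1 > ans then run + 1 else ans), run + 1, 1, b, some (arr.getD head 0)) := by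
            simp only [nStep]
            rw [if_neg (show ¬(some (arr.getD head 0) = a ∨ some (arr.getD head 0) = b) from
                  fun h => h.elim hca hsbne),
                if_neg (show ¬ some (arr.getD head 0) = b from hsbne), if_pos hsbne]
          simp only [hstep_old, hstep_new]
          have harith : (head : Int) - ((0 : Nat) : Int) + 1 = run + 1 := by
            rw [hrn]; omega
          refine ⟨hI', ?_, by omega, ?_, ?_, Or.inl rfl, ?_⟩
          · show distinct + 1 = _
            rw [hcard', if_pos hcnt, ← hdist]
          · show (if (head : Int) - ((0 : Nat) : Int) + 1 > best
                then (head : Int) - ((0 : Nat) : Int) + 1 else best)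
              = (if run + 1 > ans then run + 1 else ans)
            rw [harith, hba]
          · show run + 1 = ((head + 1 : Nat) : Int) - ((0 : Nat) : Int)
            rw [hrn]; omega
          · rw [if_neg (Nat.succ_ne_zero head)]
            exact run_restart arr head 0 1 b (some (arr.getD head 0)) rfl (by omega) rfl hcx
              (fun _ => hbx)

theorem fold_rel (arr : List Int) : ∀ (k head tail : Nat) (distinct best : Int)
    (d : PySem.Dict Int Int) (ans cur run : Int) (a b : Option Int),
    head + k = arr.length →
    RelBN arr head tail distinct best d ans cur run a b →
    ((List.range' head k).foldl (bStep arr) (tail, distinct, best, d)).2.2.1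
      = ((arr.drop head).foldl nStep (ans, cur, run, a, b)).1 := by
  intro k
  induction k with
  | zero =>
    intro head tail distinct best d ans cur run a b hlen hR
    have : arr.drop head = [] := List.drop_eq_nil_of_le (by omega)
    rw [this]
    simpa using hR.2.2.2.1
  | succ k ih =>
    intro head tail distinct best d ans cur run a b hlen hR
    have hh : head < arr.length := by omega
    rw [List.range'_succ, List.foldl_cons]
    have hdrop : arr.drop head = arr.getD head 0 :: arr.drop (head + 1) := by
      rw [List.drop_eq_getElem_cons hh, List.getD_eq_getElem arr 0 hh]
    rw [hdrop, List.foldl_cons]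
    have hstep := rel_step arr head tail distinct best d ans cur run a b hR hh
    exact ih (head + 1) _ _ _ _ _ _ _ _ _ (by omega) hstep

theorem ref_eq_new (arr : List Int) : refSlide arr = count_items_op_alt arr := by
  unfold refSlide count_items_op_alt
  rw [List.range_eq_range']
  have h0 : RelBN arr 0 0 0 0 PySem.Dict.empty 0 0 0 none none := by
    refine ⟨invd_init arr, by simp [pvWin], by norm_num, rfl, by norm_num, Or.inl rfl, by simp⟩
  have h := fold_rel arr arr.length 0 0 0 0 PySem.Dict.empty 0 0 0 none none (by omega) h0
  simpa using h

-- ===== VERDICT (by name: the statement is the Claim_ definition above) =====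
theorem count_items_op_spec : Claim_equal_count_items_op := by
  intro arr _
  unfold Spec_count_items_op
  rw [a_eq_ref, ref_eq_new]
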